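-- pv_equiv track=rewrite | github.com/copperfield42/itertools_recipes | itertools_recipes.py | ida_y_vuelta
-- ===== SOURCE A (Python) =====
-- from itertools import chain, count, cycle, dropwhile, repeat, takewhile
--
-- def ida_y_vuelta(iterable):
--     u"""s-> s0,s1,s2,...,sn-2,sn-1,sn,sn-1,sn-2,...,s2,s1,s0"""
--     try:
--         ida = iter(iterable)
--         vue = reversed(iterable)
--         next(vue,None)
--         for x in chain(ida,vue):
--             yield x
--     except TypeError:
--         vue = list()
--         for x in iterable:
--             yield x
--             vue.append(x)
--         if vue:
--             vue.pop()
--         for x in reversed(vue):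
--             yield x
-- ===== SOURCE B (Python) =====
-- def ida_y_vuelta(iterable):
--     u"""s-> s0,s1,s2,...,sn-2,sn-1,sn,sn-1,sn-2,...,s2,s1,s0"""
--     seq = list(iterable)
--     n = len(seq)
--     out = [None] * (2 * n - 1 if n else 0)
--     for i, x in enumerate(seq):
--         out[i] = x
--         out[2 * n - 2 - i] = x
--     yield from out
-- ===== Notes on version B (the rewrite author's own statement) =====
-- stated objective: alternative
-- what changed: B preallocates a result buffer of length 2n-1 and, in one pass, writes each element into both its forward position i and its mirrored position 2n-2-i, instead of A's chain of the iterator with a reversed iterator whose head is dropped via next().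
import Mathlib
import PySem

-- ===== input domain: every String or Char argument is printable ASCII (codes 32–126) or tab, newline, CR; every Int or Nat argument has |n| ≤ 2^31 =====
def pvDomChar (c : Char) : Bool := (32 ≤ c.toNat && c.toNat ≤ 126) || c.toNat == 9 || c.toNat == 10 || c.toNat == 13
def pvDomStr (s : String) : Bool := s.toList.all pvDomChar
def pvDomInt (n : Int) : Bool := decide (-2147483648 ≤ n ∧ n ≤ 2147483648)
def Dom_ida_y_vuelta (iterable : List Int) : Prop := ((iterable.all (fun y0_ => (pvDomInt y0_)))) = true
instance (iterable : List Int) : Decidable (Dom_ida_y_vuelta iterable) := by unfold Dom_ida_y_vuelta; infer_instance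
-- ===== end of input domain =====

-- B replaces A's chained iterators (forward iterator, then a reversed iterator with
-- its head dropped by next()) with a preallocated buffer of length 2n-1 filled in one
-- pass by mirrored writes; same cost, different algorithm.

-- ===== PORT A =====
-- A (list input, so no TypeError branch): yields the iterable forward, then
-- reversed(iterable) with its first element dropped via next(vue, None).
def ida_y_vuelta (iterable : List Int) : List Int :=
  iterable ++ iterable.reverse.drop 1

-- ===== PORT B =====
-- B: out = [None]*(2n-1 if n else 0); for i,x in enumerate(seq): out[i] = x;
-- out[2n-2-i] = x.  The placeholder (Python None) is never read — every position is
-- overwritten — so it is ported as 0.  enumerate ↦ List.zipIdx (value, index) pairs.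
def ida_y_vuelta_alt (iterable : List Int) : List Int :=
  let n := iterable.length
  let out := List.replicate (if n = 0 then 0 else 2 * n - 1) (0 : Int)
  (iterable.zipIdx.foldl
    (fun out p => (out.set p.2 p.1).set (2 * n - 2 - p.2) p.1) out)

-- ===== PRECONDITION & SPEC =====
def Spec_ida_y_vuelta (iterable : List Int) (out : List Int) : Prop := out = ida_y_vuelta_alt iterable
instance (iterable : List Int) (out : List Int) : Decidable (Spec_ida_y_vuelta iterable out) := by unfold Spec_ida_y_vuelta; infer_instance

-- ===== CLAIM (what is proved, stated in full; the proofs are below) =====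
def Claim_equal_ida_y_vuelta : Prop := ∀ (iterable : List Int), Dom_ida_y_vuelta iterable → Spec_ida_y_vuelta iterable (ida_y_vuelta iterable)

-- ===== LEMMAS AND PROOFS =====

-- elementwise characterisation of the fold: position j holds xs[j-k] if some
-- forward write k ≤ j < n hit it, else the mirrored value, else the old buffer.
theorem pv_fold_get (n : Nat) (xs : List Int) (k : Nat) (out : List Int)
    (hk : k + xs.length = n) (hlen : out.length = 2 * n - 1) (j : Nat) :
    ((xs.zipIdx k).foldl
      (fun out p => (out.set p.2 p.1).set (2 * n - 2 - p.2) p.1) out)[j]?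
      = if k ≤ j ∧ j < n then xs[j - k]?
        else if n ≤ j + 1 ∧ j + k ≤ 2 * n - 2 then xs[(2 * n - 2 - j) - k]?
        else out[j]? := by
  induction xs generalizing k out with
  | nil =>
      simp only [List.zipIdx_nil, List.foldl_nil]
      simp only [List.length_nil] at hk
      split_ifs with h1 h2
      · omega
      · -- k = n; here n = 0 is forced, so both sides are none
        have hn : n = 0 := by omega
        subst hn
        have hout : out = [] := List.eq_nil_of_length_eq_zero (by omega)
        subst hout
        simp
      · rfl
  | cons x rest ih =>
      rw [List.zipIdx_cons, List.foldl_cons]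
      have hk' : (k + 1) + rest.length = n := by
        simp only [List.length_cons] at hk; omega
      have hkn : k < n := by simp only [List.length_cons] at hk; omega
      have hk2 : k ≤ 2 * n - 2 := by omega
      have hlen' : ((out.set k x).set (2 * n - 2 - k) x).length = 2 * n - 1 := by
        simp [hlen]
      rw [ih (k + 1) _ hk' hlen']
      by_cases hf : k + 1 ≤ j ∧ j < n
      · -- j after this step's forward position: this step's writes are invisible
        rw [if_pos hf, if_pos (show k ≤ j ∧ j < n by omega)]
        have hsub : j - k = (j - (k + 1)) + 1 := by omega
        rw [hsub]
        simp
      · rw [if_neg hf]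
        by_cases hm : n ≤ j + 1 ∧ j + (k + 1) ≤ 2 * n - 2
        · -- j before this step's mirror position: writes invisible, index shifts
          rw [if_pos hm, if_neg (show ¬(k ≤ j ∧ j < n) by omega),
              if_pos (show n ≤ j + 1 ∧ j + k ≤ 2 * n - 2 by omega)]
          have hsub : (2 * n - 2 - j) - k = ((2 * n - 2 - j) - (k + 1)) + 1 := by omega
          rw [hsub]
          simp
        · rw [if_neg hm]
          by_cases hj : j = k
          · -- this step's forward write (if k = n-1 the mirror rewrites the same x)
            rw [if_pos (show k ≤ j ∧ j < n by omega)]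
            have hsub : j - k = 0 := by omega
            rw [hsub]
            simp only [List.getElem?_cons_zero, List.getElem?_set,
                       List.length_set, hlen]
            split_ifs <;> first | rfl | omega
          · by_cases hj2 : j = 2 * n - 2 - k
            · -- this step's mirror write position
              rw [if_neg (show ¬(k ≤ j ∧ j < n) by omega),
                  if_pos (show n ≤ j + 1 ∧ j + k ≤ 2 * n - 2 by omega)]
              have h0 : (2 * n - 2 - j) - k = 0 := by omega
              rw [h0]
              simp only [List.getElem?_cons_zero, List.getElem?_set,
                         List.length_set, hlen]
              split_ifs <;> first | rfl | omega
            · -- untouched by this step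
              rw [if_neg (show ¬(k ≤ j ∧ j < n) by omega),
                  if_neg (show ¬(n ≤ j + 1 ∧ j + k ≤ 2 * n - 2) by omega),
                  List.getElem?_set, List.getElem?_set,
                  if_neg (show ¬(2 * n - 2 - k = j) by omega),
                  if_neg (show ¬(k = j) by omega)]

theorem pv_alt_eq (xs : List Int) : ida_y_vuelta_alt xs = xs ++ xs.reverse.drop 1 := by
  by_cases h0 : xs.length = 0
  · rw [List.eq_nil_of_length_eq_zero h0]
    rfl
  · unfold ida_y_vuelta_alt
    have hn1 : 1 ≤ xs.length := by omega
    have hlen : (List.replicate (if xs.length = 0 then 0 else 2 * xs.length - 1) (0 : Int)).length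
        = 2 * xs.length - 1 := by
      rw [if_neg h0]; simp
    apply List.ext_getElem?
    intro j
    rw [pv_fold_get xs.length xs 0 _ (by omega) hlen j]
    simp only [Nat.sub_zero, Nat.add_zero, Nat.zero_le, true_and]
    by_cases h1 : j < xs.length
    · rw [if_pos h1, List.getElem?_append_left (by omega)]
    · rw [if_neg h1]
      by_cases h2 : j ≤ 2 * xs.length - 2
      · rw [if_pos (by omega)]
        rw [List.getElem?_append_right (by omega), List.getElem?_drop]
        have hrev : 1 + (j - xs.length) < xs.length := by omega
        rw [List.getElem?_reverse hrev]
        congr 1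
        omega
      · rw [if_neg (by omega)]
        rw [List.getElem?_eq_none (by rw [hlen]; omega),
            List.getElem?_eq_none (by simp; omega)]

-- ===== VERDICT (by name: the statement is the Claim_ definition above) =====
theorem ida_y_vuelta_spec : Claim_equal_ida_y_vuelta := by
  intro xs _
  unfold Spec_ida_y_vuelta ida_y_vuelta
  rw [pv_alt_eq]
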